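-- pv_equiv track=rewrite | github.com/my-temporary-name/gfg | Trie/video/3_binary_matrix.py | uniqueRows
-- ===== SOURCE A (Python) =====
-- from collections import defaultdict
--
-- def uniqueRows(arr):
--     mp = defaultdict(int) # to store the frequency of each row
--     t = ""
--
--     for x in arr: # convert each row into a string
--         t = "" # initialize t as an empty string
--         for y in x: # convert each element of the row into a string
--             t += y # append the element to the string
--
--         mp[t] += 1 # increment the frequency of the row
--
--     cnt = 0
--
--     for x in mp: # count the number of rows with frequency 1
--         if mp[x]==1: # if the frequency of the row is 1
--             cnt += 1
--
--     return cnt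
-- ===== SOURCE B (Python) =====
-- def uniqueRows(arr):
--     # sort-and-scan instead of a frequency map: sort the delimiter-free row keys,
--     # then count runs of length exactly one in a single pass.
--     keys = sorted("".join(x) for x in arr)
--     cnt = 0
--     i = 0
--     n = len(keys)
--     while i < n:
--         j = i + 1
--         while j < n and keys[j] == keys[i]:
--             j += 1
--         if j == i + 1:
--             cnt += 1
--         i = j
--     return cnt
-- ===== Notes on version B (the rewrite author's own statement) =====
-- stated objective: alternative
-- what changed: Replaces A's frequency dictionary (build a hash counter, then count keys with frequency 1) by sort-then-scan: sort the delimiter-free row keys once and count runs of length exactly one in a single pass.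
import Mathlib
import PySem

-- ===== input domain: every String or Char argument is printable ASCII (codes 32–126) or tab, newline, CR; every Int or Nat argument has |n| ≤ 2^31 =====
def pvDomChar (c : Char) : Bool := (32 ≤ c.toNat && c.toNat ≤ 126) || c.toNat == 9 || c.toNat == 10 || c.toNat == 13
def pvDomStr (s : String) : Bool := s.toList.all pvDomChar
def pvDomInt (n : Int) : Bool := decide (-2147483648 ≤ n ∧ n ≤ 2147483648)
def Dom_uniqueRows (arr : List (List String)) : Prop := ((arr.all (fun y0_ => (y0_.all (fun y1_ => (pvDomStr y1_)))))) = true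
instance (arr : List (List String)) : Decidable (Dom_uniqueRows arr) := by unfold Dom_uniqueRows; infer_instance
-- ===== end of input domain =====

-- B replaces A's frequency dictionary by sort-then-scan: sort the delimiter-free row
-- keys and count runs of length exactly one in one pass (objective: alternative).

-- ===== PORT A =====
-- Strings are tracked as List Char so the kernel can evaluate them; '+=' on str is
-- exactly concatenation of the character lists.
def uniqueRows (arr : List (List String)) : Int :=
  let mp : PySem.Dict (List Char) Int :=
    arr.foldl (fun mp x =>
      mp.modify (x.foldl (fun t y => t ++ y.toList) []) 0 (· + 1)) PySem.Dict.empty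
  mp.keys.foldl (fun cnt x => if mp.getD x 0 == 1 then cnt + 1 else cnt) 0

-- ===== PORT B =====
-- the outer while loop of Source B: each step consumes one maximal run of equal keys
-- (the inner `while keys[j] == keys[i]` advance is the takeWhile/dropWhile split)
def scanRuns : List (List Char) → Int
  | [] => 0
  | a :: rest =>
    (if (rest.takeWhile (· == a)).isEmpty then 1 else 0) + scanRuns (rest.dropWhile (· == a))
termination_by s => s.length
decreasing_by
  have := List.length_dropWhile_le (· == a) rest
  simp only [List.length_cons]; omega

-- ''.join(x) is the concatenation of the row's character lists
def uniqueRows_alt (arr : List (List String)) : Int :=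
  scanRuns (PySem.List.sorted (arr.map (fun x => (x.map String.toList).flatten)) (fun k => k) false)

-- ===== PRECONDITION & SPEC =====
def Spec_uniqueRows (arr : List (List String)) (out : Int) : Prop := out = uniqueRows_alt arr
instance (arr : List (List String)) (out : Int) : Decidable (Spec_uniqueRows arr out) := by unfold Spec_uniqueRows; infer_instance

-- ===== CLAIM (what is proved, stated in full; the proofs are below) =====
def Claim_equal_uniqueRows : Prop := ∀ (arr : List (List String)), Dom_uniqueRows arr → Spec_uniqueRows arr (uniqueRows arr)

-- ===== LEMMAS AND PROOFS =====

-- the list of row keys both programs classify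
def rowKeys (arr : List (List String)) : List (List Char) :=
  arr.map (fun x => (x.map String.toList).flatten)

-- A's result is the number of distinct keys of multiplicity 1
theorem uniqueRows_eq_countP (arr : List (List String)) :
    uniqueRows arr =
      ((PySem.Set.ofList (rowKeys arr)).countP
        (fun k => (rowKeys arr).count k == 1) : ℤ) := by
  have hkey : ∀ x : List String,
      x.foldl (fun t y => t ++ y.toList) ([] : List Char) = (x.map String.toList).flatten := by
    intro x
    rw [← List.foldl_map (f := String.toList) (g := fun (acc l : List Char) => acc ++ l)]
    simpa using PySem.List.foldl_append_eq_flatten (x.map String.toList) []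
  have hmp : arr.foldl (fun mp x =>
        mp.modify (x.foldl (fun t y => t ++ y.toList) []) 0 (· + 1)) PySem.Dict.empty
      = PySem.Dict.counter (rowKeys arr) := by
    rw [PySem.Dict.counter_eq_foldl, rowKeys, List.foldl_map]
    simp only [hkey]
  simp only [uniqueRows]
  rw [hmp, PySem.List.foldl_if_add_one
        (p := fun x => (PySem.Dict.counter (rowKeys arr)).getD x 0 == 1), zero_add]
  simp only [PySem.Dict.keys_counter, PySem.Dict.getD_counter]
  congr 1
  apply List.countP_congr
  intro k _
  simp only [beq_iff_eq]
  constructor <;> intro h <;> exact_mod_cast h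

-- add on an already-present element (all of `run` equals `a`, a ∈ s) is the identity
theorem set_foldl_const {α : Type} [BEq α] [LawfulBEq α] (a : α) :
    ∀ (run : List α) (s : PySem.Set α), (∀ b ∈ run, b = a) → a ∈ s →
      List.foldl PySem.Set.add s run = s := by
  intro run
  induction run with
  | nil => intro s _ _; rfl
  | cons x xs ih =>
    intro s hall hs
    have hx : x = a := hall x (by simp)
    have hstep : PySem.Set.add s x = s := by
      simp [PySem.Set.add, PySem.Set.contains, hx, hs]
    rw [List.foldl_cons, hstep]
    exact ih s (fun b hb => hall b (by simp [hb])) hs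

-- folding adds over elements distinct from the head leaves the head in front
theorem set_foldl_cons {α : Type} [BEq α] [LawfulBEq α] (a : α) :
    ∀ (l : List α) (s : PySem.Set α), a ∉ l →
      List.foldl PySem.Set.add (a :: s) l = a :: List.foldl PySem.Set.add s l := by
  intro l
  induction l with
  | nil => intro s _; rfl
  | cons x xs ih =>
    intro s hnl
    have hxa : x ≠ a := fun h => hnl (by simp [h])
    have hstep : PySem.Set.add (a :: s) x = a :: PySem.Set.add s x := by
      by_cases hmem : x ∈ s
      · simp [PySem.Set.add, PySem.Set.contains, hmem, hxa]
      · simp [PySem.Set.add, PySem.Set.contains, hmem, hxa]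
    rw [List.foldl_cons, hstep, List.foldl_cons]
    exact ih _ (fun h => hnl (List.mem_cons_of_mem _ h))

-- in a sorted list, the head does not reappear after its initial run
theorem head_not_mem_dropWhile (a : List Char) (rest : List (List Char))
    (hale : ∀ b ∈ rest, a ≤ b) (hpwrest : rest.Pairwise (· ≤ ·)) :
    a ∉ rest.dropWhile (· == a) := by
  intro hmem
  cases hld : rest.dropWhile (· == a) with
  | nil => rw [hld] at hmem; simp at hmem
  | cons b t =>
    have hne : rest.dropWhile (· == a) ≠ [] := by rw [hld]; simp
    have hhead := List.head_dropWhile_not (· == a) hne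
    simp only [hld, List.head_cons] at hhead
    have hba : b ≠ a := by simpa [beq_iff_eq] using hhead
    have hbmem : b ∈ rest := (List.dropWhile_sublist _).subset (by rw [hld]; simp)
    have hab : a ≤ b := hale b hbmem
    have hpw' : (rest.dropWhile (· == a)).Pairwise (· ≤ ·) :=
      hpwrest.sublist (List.dropWhile_sublist _)
    rw [hld] at hpw' hmem
    rcases List.mem_cons.mp hmem with h | h
    · exact hba h.symm
    · exact hba (le_antisymm ((List.pairwise_cons.mp hpw').1 a h) hab)

-- run scan over a sorted list counts the distinct keys of multiplicity 1
theorem scanRuns_sorted_aux : ∀ (n : Nat) (s : List (List Char)), s.length ≤ n →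
    s.Pairwise (· ≤ ·) →
    scanRuns s = ((PySem.Set.ofList s).countP (fun k => s.count k == 1) : ℤ) := by
  intro n
  induction n with
  | zero =>
    intro s hlen _
    have hs : s = [] := by cases s <;> simp_all
    subst hs
    simp [scanRuns, PySem.Set.ofList_eq_foldl]
  | succ n ih =>
    intro s hlen hpw
    match s with
    | [] => simp [scanRuns, PySem.Set.ofList_eq_foldl]
    | a :: rest =>
      obtain ⟨hale, hpwrest⟩ := List.pairwise_cons.mp hpw
      have h1 : ∀ b ∈ rest.takeWhile (· == a), b = a := by
        intro b hb
        have := List.mem_takeWhile_imp hb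
        simpa [beq_iff_eq] using this
      have hnotin : a ∉ rest.dropWhile (· == a) :=
        head_not_mem_dropWhile a rest hale hpwrest
      have hpw' : (rest.dropWhile (· == a)).Pairwise (· ≤ ·) :=
        hpwrest.sublist (List.dropWhile_sublist _)
      have hlen' : (rest.dropWhile (· == a)).length ≤ n := by
        have := List.length_dropWhile_le (· == a) rest
        simp only [List.length_cons] at hlen
        omega
      -- multiplicity of the head
      have hcnt_run : (rest.takeWhile (· == a)).count a = (rest.takeWhile (· == a)).length :=
        List.count_eq_length.mpr (fun b hb => (h1 b hb).symm)
      have hcnt_rest : rest.count a =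
          (rest.takeWhile (· == a)).length := by
        calc rest.count a = (rest.takeWhile (· == a) ++ rest.dropWhile (· == a)).count a := by
              rw [List.takeWhile_append_dropWhile]
          _ = (rest.takeWhile (· == a)).length := by
              rw [List.count_append, hcnt_run, List.count_eq_zero.mpr hnotin, Nat.add_zero]
      have hcnt_a : (a :: rest).count a = (rest.takeWhile (· == a)).length + 1 := by
        rw [List.count_cons_self, hcnt_rest]
      -- multiplicity of the other keys
      have hcnt_ne : ∀ k, k ≠ a → (a :: rest).count k = (rest.dropWhile (· == a)).count k := by
        intro k hk
        have hkrun : (rest.takeWhile (· == a)).count k = 0 :=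
          List.count_eq_zero.mpr (fun hmem => hk (h1 k hmem))
        calc (a :: rest).count k = rest.count k := by
              rw [List.count_cons, if_neg (by simpa [beq_iff_eq] using Ne.symm hk), Nat.add_zero]
          _ = (rest.takeWhile (· == a) ++ rest.dropWhile (· == a)).count k := by
              rw [List.takeWhile_append_dropWhile]
          _ = (rest.dropWhile (· == a)).count k := by
              rw [List.count_append, hkrun, Nat.zero_add]
      -- the distinct keys
      have hset : PySem.Set.ofList (a :: rest) = a :: PySem.Set.ofList (rest.dropWhile (· == a)) := by
        rw [PySem.Set.ofList_eq_foldl, PySem.Set.ofList_eq_foldl, List.foldl_cons]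
        rw [show PySem.Set.add [] a = [a] from by simp [PySem.Set.add, PySem.Set.contains]]
        calc List.foldl PySem.Set.add [a] rest
            = List.foldl PySem.Set.add [a] (rest.takeWhile (· == a) ++ rest.dropWhile (· == a)) := by
              rw [List.takeWhile_append_dropWhile]
          _ = List.foldl PySem.Set.add [a] (rest.dropWhile (· == a)) := by
              rw [List.foldl_append, set_foldl_const a _ [a] h1 (by simp)]
          _ = a :: List.foldl PySem.Set.add [] (rest.dropWhile (· == a)) :=
              set_foldl_cons a _ [] hnotin
      -- put it together
      rw [scanRuns, hset, List.countP_cons,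
          ih (rest.dropWhile (· == a)) hlen' hpw']
      have hcongr : (PySem.Set.ofList (rest.dropWhile (· == a))).countP
            (fun k => (a :: rest).count k == 1)
          = (PySem.Set.ofList (rest.dropWhile (· == a))).countP
            (fun k => (rest.dropWhile (· == a)).count k == 1) := by
        apply List.countP_congr
        intro k hk
        have hkmem : k ∈ rest.dropWhile (· == a) := (PySem.Set.mem_ofList _ _).mp hk
        have hka : k ≠ a := fun h => hnotin (h ▸ hkmem)
        rw [hcnt_ne k hka]
      rw [← hcongr]
      by_cases hre : (rest.takeWhile (· == a)).isEmpty
      · have hlen0 : (rest.takeWhile (· == a)).length = 0 := by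
          simpa [List.isEmpty_iff_length_eq_zero] using hre
        rw [if_pos hre, if_pos (by simp only [hcnt_a, hlen0, beq_iff_eq])]
        push_cast; ring
      · have hlen0 : (rest.takeWhile (· == a)).length ≠ 0 := by
          simpa [List.isEmpty_iff_length_eq_zero] using hre
        rw [if_neg hre, if_neg (by simp only [hcnt_a, beq_iff_eq]; omega)]
        push_cast; ring

theorem scanRuns_sorted_eq (s : List (List Char)) (h : s.Pairwise (· ≤ ·)) :
    scanRuns s = ((PySem.Set.ofList s).countP (fun k => s.count k == 1) : ℤ) :=
  scanRuns_sorted_aux s.length s le_rfl h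

-- ===== VERDICT (by name: the statement is the Claim_ definition above) =====
theorem uniqueRows_spec : Claim_equal_uniqueRows := by
  intro arr _
  unfold Spec_uniqueRows uniqueRows_alt
  have hinst : (LinearOrder.toDecidableLT : DecidableLT (List Char))
      = (fun (a b : List Char) => a.decidableLT b) := by
    funext a b; exact Subsingleton.elim _ _
  have hpw : List.Pairwise (· ≤ ·)
      (PySem.List.sorted (arr.map (fun x => (x.map String.toList).flatten)) (fun k => k) false) := by
    have h := PySem.List.sorted_pairwise (arr.map (fun x => (x.map String.toList).flatten)) (fun k => k)
    rw [hinst] at h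
    exact h
  rw [uniqueRows_eq_countP, scanRuns_sorted_eq _ hpw]
  have hperm : (PySem.List.sorted (arr.map (fun x => (x.map String.toList).flatten))
      (fun k => k) false).Perm (rowKeys arr) := PySem.List.sorted_perm _ _ _
  have hpred : (fun k => (PySem.List.sorted (arr.map (fun x => (x.map String.toList).flatten))
        (fun k => k) false).count k == 1)
      = (fun k => (rowKeys arr).count k == 1) :=
    funext fun k => by rw [hperm.count_eq]
  have hsp : (PySem.Set.ofList (PySem.List.sorted (arr.map (fun x => (x.map String.toList).flatten))
      (fun k => k) false)).Perm (PySem.Set.ofList (rowKeys arr)) :=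
    (List.perm_ext_iff_of_nodup (PySem.Set.nodup_ofList _) (PySem.Set.nodup_ofList _)).mpr
      (fun k => by simp [PySem.Set.mem_ofList, hperm.mem_iff])
  rw [hpred, hsp.countP_eq]
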